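-- pv_equiv track=rewrite | github.com/Lil-mani/maratona | Estrutura de dados/matematica/analise_Combinatoria/PermutacaoMatematica.py | number_of_anagrams
-- ===== SOURCE A (Python) =====
-- from collections import Counter
--
-- MOD = 100000007
--
-- def factorial(n):
--     if n == 0:
--         return 1
--     res = 1
--     for i in range(1, n + 1):
--         res = (res * i) % MOD
--     return res
--
-- def number_of_anagrams(s):
--     count = Counter(s)
--     denominator = 1
--     for i in count.values():
--         denominator = (denominator * factorial(i)) % MOD
--     numerator = factorial(len(s))
--     result = (numerator * pow(denominator, -1, MOD)) % MOD
--     return result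
-- ===== SOURCE B (Python) =====
-- from collections import Counter
--
-- MOD = 100000007
--
-- def number_of_anagrams(s):
--     # multinomial as an incremental product of binomial coefficients
--     total = 0
--     result = 1
--     for c in Counter(s).values():
--         total += c
--         binom = 1                     # C(total, c) by the multiplicative formula (exact integer division)
--         for k in range(1, c + 1):
--             binom = binom * (total - c + k) // k
--         result = result * binom % MOD
--     return result
-- ===== Notes on version B (the rewrite author's own statement) =====
-- stated objective: simpler
-- what changed: Replaces n! mod p times a modular inverse of the product of count factorials with an incremental product of exact binomial coefficients C(running total, count) mod p, eliminating the factorial helper and pow(denominator, -1, MOD).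
import Mathlib
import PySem

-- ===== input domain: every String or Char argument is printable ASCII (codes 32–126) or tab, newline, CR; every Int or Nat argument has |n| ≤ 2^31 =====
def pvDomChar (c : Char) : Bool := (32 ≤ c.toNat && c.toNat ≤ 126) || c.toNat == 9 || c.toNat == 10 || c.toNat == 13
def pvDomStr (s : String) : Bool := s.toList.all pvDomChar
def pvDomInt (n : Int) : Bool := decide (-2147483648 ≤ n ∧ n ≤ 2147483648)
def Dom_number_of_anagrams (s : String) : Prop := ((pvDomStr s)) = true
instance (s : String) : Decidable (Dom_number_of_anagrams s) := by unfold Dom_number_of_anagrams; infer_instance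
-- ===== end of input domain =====

-- B computes the multinomial mod 100000007 as an incremental product of exact binomial
-- coefficients (no factorial helper, no modular inverse): simpler, same results.


-- ===== PORT A =====
-- helper `factorial` of A
def pvFactA (n : Int) : Int :=
  if n = 0 then 1
  else (PySem.List.pyRange 1 (n + 1)).foldl (fun res i => PySem.Int.mod (res * i) 100000007) 1

-- pow(a, -1, m): Python's modular inverse, none exactly where Python raises ValueError.
-- Exact for 0 ≤ a and 0 < m (A calls it with a = denominator ∈ [0, m), m = 100000007).
def pvInvMod? (a m : Int) : Option Int :=
  if Int.gcd a m = 1 then some (PySem.Int.mod (Nat.gcdA a.natAbs m.natAbs) m) else none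

def number_of_anagrams (s : String) : Int :=
  let count := PySem.Dict.counter s.toList
  let denominator :=
    count.values.foldl (fun d i => PySem.Int.mod (d * pvFactA i) 100000007) 1
  let numerator := pvFactA (PySem.Str.len s)
  -- `.getD 0` is never taken under Pre_ (there pvInvMod? is some): Pre_ excludes the ValueError inputs
  PySem.Int.mod (numerator * (pvInvMod? denominator 100000007).getD 0) 100000007

-- ===== PORT B =====
-- inner loop of B: C(total, c) by the multiplicative formula (exact integer division)
def pvBinom (total c : Int) : Int :=
  (PySem.List.pyRange 1 (c + 1)).foldl
    (fun b k => PySem.Int.floordiv (b * (total - c + k)) k) 1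

-- body of B's outer loop: state = (total, result)
def pvStepB (st : Int × Int) (c : Int) : Int × Int :=
  let total := st.1 + c
  (total, PySem.Int.mod (st.2 * pvBinom total c) 100000007)

def number_of_anagrams_alt (s : String) : Int :=
  ((PySem.Dict.counter s.toList).values.foldl pvStepB (0, 1)).2

-- ===== PRECONDITION & SPEC =====
-- Pre_ excludes only strings in which some character occurs at least 100000007 times:
-- there A's denominator is 0 mod the prime modulus and pow(denominator, -1, MOD) raises ValueError.
def Pre_number_of_anagrams (s : String) : Prop :=
  (s.toList.all (fun c => s.toList.count c < 100000007)) = true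
instance (s : String) : Decidable (Pre_number_of_anagrams s) := by
  unfold Pre_number_of_anagrams; infer_instance
def pvWitness_number_of_anagrams : String := "banana"

def Spec_number_of_anagrams (s : String) (out : Int) : Prop := out = number_of_anagrams_alt s
instance (s : String) (out : Int) : Decidable (Spec_number_of_anagrams s out) := by unfold Spec_number_of_anagrams; infer_instance

-- ===== CLAIM (what is proved, stated in full; the proofs are below) =====
def Claim_equal_number_of_anagrams : Prop := ∀ (s : String), Dom_number_of_anagrams s → Pre_number_of_anagrams s → Spec_number_of_anagrams s (number_of_anagrams s)

-- ===== LEMMAS AND PROOFS =====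

theorem pvP_prime : Nat.Prime 100000007 := by norm_num

theorem pvMulEmodLeft (a b : Int) : ((a % 100000007) * b) % 100000007 = (a * b) % 100000007 := by
  conv_lhs => rw [Int.mul_emod]
  rw [Int.emod_emod_of_dvd _ dvd_rfl, ← Int.mul_emod]

theorem pvMulEmodRight (a b : Int) : (a * (b % 100000007)) % 100000007 = (a * b) % 100000007 := by
  rw [mul_comm, pvMulEmodLeft, mul_comm]

theorem pvCongrMulRight (a b b' : Int) (h : b % 100000007 = b' % 100000007) :
    (a * b) % 100000007 = (a * b') % 100000007 := by
  rw [Int.mul_emod, h, ← Int.mul_emod]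

-- A's factorial loop computes n! mod 100000007
theorem pvFactA_loop (n : Nat) :
    (PySem.List.pyRange 1 ((n : Int) + 1)).foldl (fun res i => PySem.Int.mod (res * i) 100000007) 1
      = ((n.factorial : Int)) % 100000007 := by
  induction n with
  | zero => simp [PySem.List.pyRange]
  | succ n ih =>
      have h1 : (1 : Int) ≤ (n : Int) + 1 := by omega
      have h2 : ((n + 1 : Nat) : Int) + 1 = ((n : Int) + 1) + 1 := by push_cast; ring
      rw [h2, PySem.List.pyRange_one_succ_right h1, List.foldl_append, ih]
      simp only [List.foldl_cons, List.foldl_nil]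
      rw [PySem.Int.mod_eq_emod_of_pos (by norm_num), pvMulEmodLeft, Nat.factorial_succ]
      push_cast
      ring_nf

theorem pvFactA_eq (n : Nat) : pvFactA (n : Int) = ((n.factorial : Int)) % 100000007 := by
  rcases Nat.eq_zero_or_pos n with h | h
  · subst h; simp [pvFactA]
  · rw [pvFactA, if_neg (by exact_mod_cast Nat.pos_iff_ne_zero.mp h), pvFactA_loop]

-- inner invariant of B's binomial loop
theorem pvBinom_aux (d j : Nat) :
    (PySem.List.pyRange 1 ((j : Int) + 1)).foldl
      (fun b k => PySem.Int.floordiv (b * ((d : Int) + k)) k) 1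
    = ((d + j).choose j : Int) := by
  induction j with
  | zero => simp [PySem.List.pyRange]
  | succ j ih =>
      have h1 : (1 : Int) ≤ (j : Int) + 1 := by omega
      have h2 : ((j + 1 : Nat) : Int) + 1 = ((j : Int) + 1) + 1 := by push_cast; ring
      rw [h2, PySem.List.pyRange_one_succ_right h1, List.foldl_append, ih]
      simp only [List.foldl_cons, List.foldl_nil]
      rw [PySem.Int.floordiv_eq_ediv_of_pos (by omega)]
      have key : (d + j + 1) * (d + j).choose j = (d + j + 1).choose (j + 1) * (j + 1) :=
        Nat.add_one_mul_choose_eq (d + j) j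
      have h3 : ((d + j).choose j : Int) * ((d : Int) + ((j : Int) + 1))
          = ((d + j + 1).choose (j + 1) : Int) * ((j : Int) + 1) := by
        push_cast at key
        linarith [key]
      rw [h3, Int.mul_ediv_cancel _ (by omega)]
      norm_num [show d + (j + 1) = d + j + 1 from by omega]

theorem pvBinom_eq (d c : Nat) :
    pvBinom (((d + c : Nat) : Int)) (c : Int) = ((d + c).choose c : Int) := by
  rw [pvBinom]
  have h : (fun (b k : Int) => PySem.Int.floordiv (b * (((d + c : Nat) : Int) - (c : Int) + k)) k)
      = fun (b k : Int) => PySem.Int.floordiv (b * ((d : Int) + k)) k := by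
    funext b k
    have h1 : ((d + c : Nat) : Int) - (c : Int) = (d : Int) := by push_cast; ring
    rw [h1]
  rw [h, pvBinom_aux]

-- exact prefix product of binomials (what B multiplies up)
def pvChooseProd : Nat → List Nat → Nat
  | _, [] => 1
  | t, c :: cs => (t + c).choose c * pvChooseProd (t + c) cs

-- the multinomial identity
theorem pvChooseProd_mul (ns : List Nat) (t : Nat) :
    t.factorial * pvChooseProd t ns * (ns.map Nat.factorial).prod
      = (t + ns.sum).factorial := by
  induction ns generalizing t with
  | nil => simp [pvChooseProd]
  | cons c cs ih =>
      simp only [pvChooseProd, List.map_cons, List.prod_cons, List.sum_cons]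
      have key : (t + c).choose c * c.factorial * t.factorial = (t + c).factorial := by
        have h := Nat.choose_mul_factorial_mul_factorial (Nat.le_add_left c t)
        simpa [Nat.add_sub_cancel] using h
      calc t.factorial * ((t + c).choose c * pvChooseProd (t + c) cs)
              * (c.factorial * (cs.map Nat.factorial).prod)
          = ((t + c).choose c * c.factorial * t.factorial)
              * (pvChooseProd (t + c) cs * (cs.map Nat.factorial).prod) := by ring
        _ = (t + c).factorial * pvChooseProd (t + c) cs * (cs.map Nat.factorial).prod := by
              rw [key]; ring
        _ = ((t + c) + cs.sum).factorial := ih (t + c)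
        _ = (t + (c + cs.sum)).factorial := by ring_nf

-- B's outer fold, characterised
theorem pvFoldB (ns : List Nat) (t : Nat) (r : Int) :
    (ns.map (fun (c : Nat) => (c : Int))).foldl pvStepB ((t : Int), r)
      = (((t + ns.sum : Nat) : Int),
         if ns = [] then r else (r * (pvChooseProd t ns : Int)) % 100000007) := by
  induction ns generalizing t r with
  | nil => simp
  | cons c cs ih =>
      have h1 : ((t : Int) + (c : Int)) = ((t + c : Nat) : Int) := by push_cast; ring
      have hstep : pvStepB ((t : Int), r) (c : Int)
          = (((t + c : Nat) : Int), (r * (((t + c).choose c : Nat) : Int)) % 100000007) := by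
        simp only [pvStepB]
        rw [h1, pvBinom_eq t c, PySem.Int.mod_eq_emod_of_pos (by norm_num)]
      rw [List.map_cons, List.foldl_cons, hstep, ih]
      rcases cs with _ | ⟨c', cs'⟩
      · simp [pvChooseProd]
      · simp only [List.sum_cons, pvChooseProd, if_neg (List.cons_ne_nil _ _),
          Prod.mk.injEq]
        constructor
        · push_cast; ring
        · rw [pvMulEmodLeft, mul_assoc]
          push_cast
          ring_nf

-- A's denominator fold, characterised (up to mod)
theorem pvFoldA (l : List Int) (r : Int) :
    l.foldl (fun d i => PySem.Int.mod (d * pvFactA i) 100000007) r % 100000007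
      = (r * (l.map pvFactA).prod) % 100000007 := by
  induction l generalizing r with
  | nil => simp
  | cons i l ih =>
      simp only [List.foldl_cons, List.map_cons, List.prod_cons]
      rw [ih, PySem.Int.mod_eq_emod_of_pos (by norm_num), pvMulEmodLeft, mul_assoc]

theorem pvFoldA_nonneg (l : List Int) (r : Int) (hr : 0 ≤ r) :
    0 ≤ l.foldl (fun d i => PySem.Int.mod (d * pvFactA i) 100000007) r := by
  induction l generalizing r with
  | nil => exact hr
  | cons i l ih => exact ih _ (PySem.Int.mod_nonneg _ (by norm_num))

-- product of mod-reduced factorials ≡ product of factorials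
theorem pvProdMod (ns : List Nat) :
    ((ns.map (fun c => ((c.factorial : Int)) % 100000007)).prod) % 100000007
      = ((ns.map (fun c => (c.factorial : Int))).prod) % 100000007 := by
  induction ns with
  | nil => rfl
  | cons c cs ih =>
      simp only [List.map_cons, List.prod_cons]
      rw [pvMulEmodLeft, Int.mul_emod, ih, ← Int.mul_emod]

-- the extended-Euclid inverse really inverts
theorem pvInv_works (D : Int) (hD : 0 ≤ D) (h : Int.gcd D 100000007 = 1) :
    (D * (Nat.gcdA D.natAbs 100000007 % 100000007)) % 100000007 = 1 % 100000007 := by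
  have hD' : ((D.natAbs : Nat) : Int) = D := Int.natAbs_of_nonneg hD
  have hg : (D.natAbs.gcd 100000007 : Int) = 1 := by
    have h2 : Int.gcd D 100000007 = D.natAbs.gcd 100000007 := by simp [Int.gcd]
    rw [h2] at h; exact_mod_cast h
  have hab := Nat.gcd_eq_gcd_ab D.natAbs 100000007
  rw [hg, hD'] at hab
  push_cast at hab
  rw [mul_comm, pvMulEmodLeft, mul_comm]
  have h3 : D * Nat.gcdA D.natAbs 100000007
      = 1 - 100000007 * Nat.gcdB D.natAbs 100000007 := by linarith
  rw [h3, Int.sub_mul_emod_self_left]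

-- sum of the multiplicities over the distinct elements is the length
theorem pvSumCounts (xs : List Char) :
    ((PySem.Set.ofList xs).map (fun k => xs.count k)).sum = xs.length := by
  have h1 : (PySem.Set.ofList xs).Perm xs.dedup := by
    rw [List.perm_ext_iff_of_nodup (PySem.Set.nodup_ofList xs) (List.nodup_dedup xs)]
    intro a
    rw [PySem.Set.mem_ofList, List.mem_dedup]
  calc ((PySem.Set.ofList xs).map (fun k => xs.count k)).sum
      = ((xs.dedup.map (fun k => xs.count k))).sum := (h1.map _).sum_eq
    _ = xs.length := List.sum_map_count_dedup_eq_length xs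

-- ===== VERDICT (by name: the statement is the Claim_ definition above) =====
theorem number_of_anagrams_spec : Claim_equal_number_of_anagrams := by
  intro s _ hpre
  have hpre' : ∀ c ∈ s.toList, s.toList.count c < 100000007 := by
    intro c hc
    exact of_decide_eq_true (List.all_eq_true.mp hpre c hc)
  unfold Spec_number_of_anagrams
  have hvals : (PySem.Dict.counter s.toList).values
      = ((PySem.Set.ofList s.toList).map (fun k => s.toList.count k)).map
          (fun (c : Nat) => (c : Int)) := by
    simp [PySem.Dict.values, PySem.Dict.items_counter, List.map_map, Function.comp]
  set ns : List Nat := (PySem.Set.ofList s.toList).map (fun k => s.toList.count k) with hns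
  have hlt : ∀ c ∈ ns, c < 100000007 := by
    intro c hc
    rw [hns] at hc
    obtain ⟨k, hk, rfl⟩ := List.mem_map.1 hc
    exact hpre' k ((PySem.Set.mem_ofList s.toList k).1 hk)
  have hsum : ns.sum = s.toList.length := pvSumCounts s.toList
  -- B's value
  have hB : number_of_anagrams_alt s = ((pvChooseProd 0 ns : Nat) : Int) % 100000007 := by
    unfold number_of_anagrams_alt
    rw [hvals]
    have h0 := pvFoldB ns 0 1
    simp only [Nat.cast_zero, Nat.zero_add] at h0
    rw [h0]
    rcases eq_or_ne ns [] with h | h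
    · rw [h]; simp [pvChooseProd]
    · simp [if_neg h]
  -- A's denominator
  set D : Int :=
    ((ns.map (fun (c : Nat) => (c : Int))).foldl
      (fun d i => PySem.Int.mod (d * pvFactA i) 100000007) 1) with hDdef
  set DxN : Nat := (ns.map Nat.factorial).prod with hDxN
  have hcastDx : ((DxN : Nat) : Int) = (ns.map (fun c => (c.factorial : Int))).prod := by
    rw [hDxN, Nat.cast_list_prod, List.map_map]
    rfl
  have hDmod : D % 100000007 = (DxN : Int) % 100000007 := by
    rw [hDdef, pvFoldA, one_mul]
    have hmap : ((ns.map (fun (c : Nat) => (c : Int))).map pvFactA)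
        = ns.map (fun c => ((c.factorial : Int)) % 100000007) := by
      rw [List.map_map]
      refine List.map_congr_left ?_
      intro c _
      exact pvFactA_eq c
    rw [hmap, pvProdMod, hcastDx]
  have hD0 : 0 ≤ D := pvFoldA_nonneg _ _ (by norm_num)
  have hnd : ¬ ((100000007 : Nat) ∣ DxN) := by
    intro hdvd
    obtain ⟨a, ha, hpa⟩ := (Prime.dvd_prod_iff pvP_prime.prime).1 hdvd
    obtain ⟨c, hc, rfl⟩ := List.mem_map.1 ha
    have hle := (Nat.Prime.dvd_factorial pvP_prime).1 hpa
    exact absurd (hlt c hc) (by omega)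
  have hgcd : Int.gcd D 100000007 = 1 := by
    have hDd : ¬ ((100000007 : Int) ∣ D) := by
      intro hdvd
      apply hnd
      have h1 : D % 100000007 = 0 := Int.emod_eq_zero_of_dvd hdvd
      have h2 : ((DxN : Int)) % 100000007 = 0 := by rw [← hDmod]; exact h1
      have h3 : (100000007 : Int) ∣ (DxN : Int) := Int.dvd_of_emod_eq_zero h2
      exact_mod_cast h3
    have hco : Nat.Coprime 100000007 D.natAbs := by
      refine (Nat.Prime.coprime_iff_not_dvd pvP_prime).2 ?_
      intro h'
      apply hDd
      have h4 : ((100000007 : Nat) : Int) ∣ ((D.natAbs : Nat) : Int) := Int.natCast_dvd_natCast.2 h'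
      rw [Int.natAbs_of_nonneg hD0] at h4
      exact_mod_cast h4
    have h5 : D.natAbs.gcd 100000007 = 1 := Nat.coprime_comm.mp hco
    simpa [Int.gcd] using h5
  -- A's value
  have hA : number_of_anagrams s
      = (((s.toList.length.factorial : Int)) % 100000007
          * (Nat.gcdA D.natAbs 100000007 % 100000007)) % 100000007 := by
    show PySem.Int.mod (pvFactA (PySem.Str.len s)
        * ((pvInvMod? ((PySem.Dict.counter s.toList).values.foldl
              (fun d i => PySem.Int.mod (d * pvFactA i) 100000007) 1) 100000007).getD 0))
        100000007 = _
    rw [hvals, ← hDdef]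
    simp only [pvInvMod?, if_pos hgcd, Option.getD_some]
    rw [PySem.Str.len_eq, pvFactA_eq, PySem.Int.mod_eq_emod_of_pos (by norm_num),
      PySem.Int.mod_eq_emod_of_pos (by norm_num)]
    norm_num
  rw [hA, hB]
  have hfact : ((s.toList.length.factorial : Nat) : Int)
      = ((pvChooseProd 0 ns : Nat) : Int) * (DxN : Int) := by
    have h := pvChooseProd_mul ns 0
    simp only [Nat.factorial_zero, one_mul, Nat.zero_add] at h
    rw [← hsum, ← h, Nat.cast_mul, hcastDx]
  calc ((s.toList.length.factorial : Int) % 100000007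
          * (Nat.gcdA D.natAbs 100000007 % 100000007)) % 100000007
      = ((s.toList.length.factorial : Int)
          * (Nat.gcdA D.natAbs 100000007 % 100000007)) % 100000007 := pvMulEmodLeft _ _
    _ = ((((pvChooseProd 0 ns : Nat) : Int) * (DxN : Int))
          * (Nat.gcdA D.natAbs 100000007 % 100000007)) % 100000007 := by rw [hfact]
    _ = (((pvChooseProd 0 ns : Nat) : Int)
          * ((DxN : Int) * (Nat.gcdA D.natAbs 100000007 % 100000007))) % 100000007 := by
          rw [mul_assoc]
    _ = (((pvChooseProd 0 ns : Nat) : Int)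
          * (D * (Nat.gcdA D.natAbs 100000007 % 100000007))) % 100000007 := by
          refine pvCongrMulRight _ _ _ ?_
          rw [Int.mul_emod, ← hDmod, ← Int.mul_emod]
    _ = (((pvChooseProd 0 ns : Nat) : Int) * (1 % 100000007)) % 100000007 :=
          pvCongrMulRight _ _ _ (pvInv_works D hD0 hgcd)
    _ = (((pvChooseProd 0 ns : Nat) : Int) * 1) % 100000007 := pvMulEmodRight _ _
    _ = ((pvChooseProd 0 ns : Nat) : Int) % 100000007 := by rw [mul_one]
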